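-- pv_equiv track=rewrite | github.com/YJHeo01/BOJ | 36진수 - 1036번.py | search_digit
-- ===== SOURCE A (Python) =====
-- def search_digit(sum_value):
--     digit = 1
--     while 1:
--         if sum_value < 36 ** digit:
--             digit -= 1
--             break
--         digit += 1
--     return digit
-- ===== SOURCE B (Python) =====
-- def search_digit(sum_value):
--     count = 0
--     while sum_value >= 36:
--         sum_value //= 36
--         count += 1
--     return count
-- ===== Notes on version B (the rewrite author's own statement) =====
-- stated objective: alternative
-- what changed: B counts repeated floor-divisions of the input by the base instead of growing successive powers of the base until one exceeds the input.
import Mathlib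
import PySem

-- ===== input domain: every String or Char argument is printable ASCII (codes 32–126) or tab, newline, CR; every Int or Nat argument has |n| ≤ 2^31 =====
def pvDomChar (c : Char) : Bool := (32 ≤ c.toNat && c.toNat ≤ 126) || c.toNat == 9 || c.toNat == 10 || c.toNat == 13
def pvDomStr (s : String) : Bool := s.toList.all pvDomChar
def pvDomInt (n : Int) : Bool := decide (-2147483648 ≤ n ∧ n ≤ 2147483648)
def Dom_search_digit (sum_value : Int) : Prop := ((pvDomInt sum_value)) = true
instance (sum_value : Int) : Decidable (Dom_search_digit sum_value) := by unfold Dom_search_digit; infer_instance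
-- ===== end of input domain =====

-- B replaces A's growing-powers search (compare sum_value with 36**digit for digit = 1,2,…)
-- by repeated floor-division of sum_value by 36, counting the steps; same return value, alternative algorithm.

-- termination helper for port A: the loop digit stays below 36^digit
theorem pv_lt_pow36 (d : Nat) : (d : Int) < 36 ^ d := by
  have h : d < 36 ^ d := Nat.lt_pow_self (by omega)
  exact_mod_cast h

-- termination helper for port B: one floor-division shrinks v (when v ≥ 36)
theorem pv_fd_dec (v : Int) (hv : v ≥ 36) : (PySem.Int.floordiv v 36).toNat < v.toNat := by
  have h1 : PySem.Int.floordiv v 36 < v :=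
    (PySem.Int.floordiv_lt_iff_lt_mul (by omega)).mpr (by nlinarith)
  have h2 : (0 : Int) ≤ PySem.Int.floordiv v 36 :=
    (PySem.Int.le_floordiv_iff_mul_le (by omega)).mpr (by omega)
  omega

-- ===== PORT A =====
-- while 1: if sum_value < 36 ** digit: digit -= 1; break else digit += 1
def searchA_loop (v : Int) (digit : Nat) : Int :=
  if v < 36 ^ digit then (digit : Int) - 1
  else searchA_loop v (digit + 1)
termination_by v.toNat + 1 - digit
decreasing_by
  rename_i h
  have h2 := pv_lt_pow36 digit
  omega

def search_digit (sum_value : Int) : Int := searchA_loop sum_value 1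

-- ===== PORT B =====
-- count = 0; while sum_value >= 36: sum_value //= 36; count += 1
def searchB_loop (v : Int) (count : Int) : Int :=
  if v ≥ 36 then searchB_loop (PySem.Int.floordiv v 36) (count + 1) else count
termination_by v.toNat
decreasing_by exact pv_fd_dec v (by omega)

def search_digit_alt (sum_value : Int) : Int := searchB_loop sum_value 0

-- ===== PRECONDITION & SPEC =====
def Spec_search_digit (sum_value : Int) (out : Int) : Prop := out = search_digit_alt sum_value
instance (sum_value : Int) (out : Int) : Decidable (Spec_search_digit sum_value out) := by unfold Spec_search_digit; infer_instance

-- ===== CLAIM (what is proved, stated in full; the proofs are below) =====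
def Claim_equal_search_digit : Prop := ∀ (sum_value : Int), Dom_search_digit sum_value → Spec_search_digit sum_value (search_digit sum_value)

-- ===== LEMMAS AND PROOFS =====

-- the two loop guards fire together: v < 36^(d+1) ↔ v // 36 < 36^d
theorem pv_guard_iff (v : Int) (d : Nat) :
    v < 36 ^ (d + 1) ↔ PySem.Int.floordiv v 36 < 36 ^ d := by
  rw [PySem.Int.floordiv_lt_iff_lt_mul (by omega)]
  rw [pow_succ]

-- shifting A's loop down one exponent equals one floor-division of v
theorem pv_shift (k : Nat) : ∀ (v : Int) (d : Nat), v.toNat ≤ d + k →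
    searchA_loop v (d + 1) = 1 + searchA_loop (PySem.Int.floordiv v 36) d := by
  induction k with
  | zero =>
    intro v d hle
    have hv : v < 36 ^ (d + 1) := by
      have := pv_lt_pow36 (d + 1)
      omega
    rw [searchA_loop]
    conv_rhs => rw [searchA_loop]
    rw [if_pos hv, if_pos ((pv_guard_iff v d).mp hv)]
    push_cast; ring
  | succ m ih =>
    intro v d hle
    rw [searchA_loop]
    conv_rhs => rw [searchA_loop]
    by_cases hv : v < 36 ^ (d + 1)
    · rw [if_pos hv, if_pos ((pv_guard_iff v d).mp hv)]
      push_cast; ring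
    · rw [if_neg hv, if_neg (fun h => hv ((pv_guard_iff v d).mpr h))]
      exact ih v (d + 1) (by omega)

-- B's accumulator is additive
theorem pv_acc (n : Nat) : ∀ (v : Int) (c : Int), v.toNat ≤ n →
    searchB_loop v c = c + searchB_loop v 0 := by
  induction n with
  | zero =>
    intro v c hle
    rw [searchB_loop]
    conv_rhs => rw [searchB_loop]
    have hv : ¬ v ≥ 36 := by omega
    rw [if_neg hv, if_neg hv]; ring
  | succ m ih =>
    intro v c hle
    rw [searchB_loop]
    conv_rhs => rw [searchB_loop]
    by_cases hv : v ≥ 36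
    · rw [if_pos hv, if_pos hv]
      have hdec : (PySem.Int.floordiv v 36).toNat ≤ m := by
        have := pv_fd_dec v hv
        omega
      rw [ih _ (c + 1) hdec, ih _ (0 + 1) hdec]
      ring
    · rw [if_neg hv, if_neg hv]; ring

-- main equivalence of the two loops
theorem pv_main (n : Nat) : ∀ (v : Int), v.toNat ≤ n →
    searchA_loop v 1 = searchB_loop v 0 := by
  induction n with
  | zero =>
    intro v hle
    rw [searchA_loop, searchB_loop]
    have hv : v < 36 ^ 1 := by norm_num; omega
    rw [if_pos hv, if_neg (by omega)]
    norm_num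
  | succ m ih =>
    intro v hle
    by_cases hv : v ≥ 36
    · have hdec : (PySem.Int.floordiv v 36).toNat ≤ m := by
        have := pv_fd_dec v hv
        omega
      have hA : searchA_loop v 1 = searchA_loop v 2 := by
        rw [searchA_loop]
        rw [if_neg (by norm_num; omega)]
      have hB : searchB_loop v 0 = searchB_loop (PySem.Int.floordiv v 36) (0 + 1) := by
        rw [searchB_loop, if_pos hv]
      calc searchA_loop v 1 = searchA_loop v (1 + 1) := hA
        _ = 1 + searchA_loop (PySem.Int.floordiv v 36) 1 := pv_shift v.toNat v 1 (by omega)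
        _ = 1 + searchB_loop (PySem.Int.floordiv v 36) 0 := by rw [ih _ hdec]
        _ = searchB_loop (PySem.Int.floordiv v 36) (0 + 1) := by
              rw [pv_acc m _ (0 + 1) hdec]; ring
        _ = searchB_loop v 0 := hB.symm
    · rw [searchA_loop, searchB_loop]
      rw [if_pos (by norm_num; omega), if_neg (by omega)]
      norm_num

-- ===== VERDICT (by name: the statement is the Claim_ definition above) =====
theorem search_digit_spec : Claim_equal_search_digit := by
  intro v _
  unfold Spec_search_digit search_digit search_digit_alt
  exact pv_main v.toNat v (le_refl _)
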